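-- pv_equiv track=rewrite | github.com/jdchart/COESO-Collaborative-Analytics | Scripts/Final-Touches/utils.py | csvGetDates
-- ===== SOURCE A (Python) =====
-- def csvGetDates(csvData, toSearch):
--     toReturn = [None, None, None]
--     for row in csvData:
--         for term in row:
--             if term == toSearch:
--                 if row[1] != '':
--                     toReturn[0] = row[1]
--                 if row[2] != '':
--                     toReturn[1] = row[2]
--                 if row[4] != '':
--                     toReturn[2] = row[4]
--     return toReturn
-- ===== SOURCE B (Python) =====
-- def csvGetDates(csvData, toSearch):
--     d1 = d2 = d3 = None
--     for row in reversed(list(csvData)):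
--         if toSearch in row:
--             if d1 is None and row[1] != '':
--                 d1 = row[1]
--             if d2 is None and row[2] != '':
--                 d2 = row[2]
--             if d3 is None and row[4] != '':
--                 d3 = row[4]
--             if d1 is not None and d2 is not None and d3 is not None:
--                 break
--     return [d1, d2, d3]
-- ===== Notes on version B (the rewrite author's own statement) =====
-- stated objective: alternative
-- what changed: B iterates the rows in reverse with per-field set-once (first non-empty match in reverse = A's last non-empty match forward) and breaks early once all three fields are filled, instead of A's forward overwrite with a redundant inner scan per cell.
import Mathlib
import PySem

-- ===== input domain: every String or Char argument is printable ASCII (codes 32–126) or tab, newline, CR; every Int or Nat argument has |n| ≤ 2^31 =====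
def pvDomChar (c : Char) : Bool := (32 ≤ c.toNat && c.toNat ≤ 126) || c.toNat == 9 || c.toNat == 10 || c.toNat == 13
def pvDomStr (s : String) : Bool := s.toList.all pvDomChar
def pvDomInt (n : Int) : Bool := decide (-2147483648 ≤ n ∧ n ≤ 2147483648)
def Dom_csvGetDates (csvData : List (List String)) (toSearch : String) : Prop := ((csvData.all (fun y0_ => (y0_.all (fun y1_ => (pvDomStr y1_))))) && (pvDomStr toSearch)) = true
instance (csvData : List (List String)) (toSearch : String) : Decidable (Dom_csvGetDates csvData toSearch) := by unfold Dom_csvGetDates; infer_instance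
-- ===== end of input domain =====

-- B scans the rows once in REVERSE with per-field set-once (first non-empty match in reverse = A's
-- last non-empty match forward) and an early break once all three fields are filled; same result,
-- different decomposition.

-- row[i]: exact Python indexing under Pre_ (index in range there); outside Pre_ Python raises.
def pvCell (row : List String) (i : Int) : String := (PySem.List.pyGet? row i).getD ""

-- ===== PORT A =====
-- body of A's inner 'for term in row' loop
def pvStepA (toSearch : String) (row : List String)
    (tr : Option String × Option String × Option String) (term : String) :
    Option String × Option String × Option String :=
  if term == toSearch then
    let tr := if pvCell row 1 ≠ "" then (some (pvCell row 1), tr.2.1, tr.2.2) else tr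
    let tr := if pvCell row 2 ≠ "" then (tr.1, some (pvCell row 2), tr.2.2) else tr
    if pvCell row 4 ≠ "" then (tr.1, tr.2.1, some (pvCell row 4)) else tr
  else tr

def csvGetDates (csvData : List (List String)) (toSearch : String) : List (Option String) :=
  let tr := csvData.foldl (fun tr row => row.foldl (pvStepA toSearch row) tr)
    ((none : Option String), (none : Option String), (none : Option String))
  [tr.1, tr.2.1, tr.2.2]

-- ===== PORT B =====
-- B's reverse loop with per-slot set-once and early break
def pvLoopB (toSearch : String) : List (List String) →
    (Option String × Option String × Option String) →
    (Option String × Option String × Option String)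
  | [], tr => tr
  | row :: rest, tr =>
    if toSearch ∈ row then
      let d1 := if tr.1 = none ∧ pvCell row 1 ≠ "" then some (pvCell row 1) else tr.1
      let d2 := if tr.2.1 = none ∧ pvCell row 2 ≠ "" then some (pvCell row 2) else tr.2.1
      let d3 := if tr.2.2 = none ∧ pvCell row 4 ≠ "" then some (pvCell row 4) else tr.2.2
      if d1.isSome ∧ d2.isSome ∧ d3.isSome then (d1, d2, d3)
      else pvLoopB toSearch rest (d1, d2, d3)
    else pvLoopB toSearch rest tr

def csvGetDates_alt (csvData : List (List String)) (toSearch : String) : List (Option String) :=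
  let tr := pvLoopB toSearch csvData.reverse (none, none, none)
  [tr.1, tr.2.1, tr.2.2]

-- ===== PRECONDITION & SPEC =====
-- Pre_ excludes exactly the inputs where Python A raises IndexError: a row that contains toSearch
-- but has fewer than 5 cells.
def Pre_csvGetDates (csvData : List (List String)) (toSearch : String) : Prop :=
  ∀ row ∈ csvData, toSearch ∈ row → 5 ≤ row.length
instance (csvData : List (List String)) (toSearch : String) : Decidable (Pre_csvGetDates csvData toSearch) := by unfold Pre_csvGetDates; infer_instance

def pvWitness_csvGetDates : List (List String) × String :=
  ([["x", "2021", "", "q", "3-4"], ["y", "1999", "2000", "q", ""]], "x")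

def Spec_csvGetDates (csvData : List (List String)) (toSearch : String) (out : List (Option String)) : Prop := out = csvGetDates_alt csvData toSearch
instance (csvData : List (List String)) (toSearch : String) (out : List (Option String)) : Decidable (Spec_csvGetDates csvData toSearch out) := by unfold Spec_csvGetDates; infer_instance

-- ===== CLAIM (what is proved, stated in full; the proofs are below) =====
def Claim_equal_csvGetDates : Prop := ∀ (csvData : List (List String)) (toSearch : String), Dom_csvGetDates csvData toSearch → Pre_csvGetDates csvData toSearch → Spec_csvGetDates csvData toSearch (csvGetDates csvData toSearch)

-- ===== LEMMAS AND PROOFS =====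

-- the value a matching row contributes to field i (none if no match or empty cell)
def pvF (s : String) (i : Int) (row : List String) : Option String :=
  if s ∈ row ∧ pvCell row i ≠ "" then some (pvCell row i) else none

-- overwrite-with-nonempty (A's per-row effect): new value wins
def pvW (s : String) (row : List String) (tr : Option String × Option String × Option String) :
    Option String × Option String × Option String :=
  ((pvF s 1 row).or tr.1, (pvF s 2 row).or tr.2.1, (pvF s 4 row).or tr.2.2)

-- set-once (B's per-row effect): old value wins
def pvW' (s : String) (row : List String) (tr : Option String × Option String × Option String) :
    Option String × Option String × Option String :=
  (tr.1.or (pvF s 1 row), tr.2.1.or (pvF s 2 row), tr.2.2.or (pvF s 4 row))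

-- A's per-row update ignoring membership
def pvU (row : List String) (tr : Option String × Option String × Option String) :
    Option String × Option String × Option String :=
  ((if pvCell row 1 ≠ "" then some (pvCell row 1) else none).or tr.1,
   (if pvCell row 2 ≠ "" then some (pvCell row 2) else none).or tr.2.1,
   (if pvCell row 4 ≠ "" then some (pvCell row 4) else none).or tr.2.2)

lemma pvStepA_eq (s : String) (row : List String) (tr : Option String × Option String × Option String)
    (term : String) : pvStepA s row tr term = if term = s then pvU row tr else tr := by
  simp only [pvStepA, pvU, beq_iff_eq]
  split_ifs <;> simp_all

lemma pvU_idem (row : List String) (tr : Option String × Option String × Option String) :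
    pvU row (pvU row tr) = pvU row tr := by
  simp only [pvU]
  split_ifs <;> simp

lemma foldl_stepA (s : String) (row : List String) (l : List String)
    (tr : Option String × Option String × Option String) :
    l.foldl (pvStepA s row) tr = if s ∈ l then pvU row tr else tr := by
  induction l generalizing tr with
  | nil => simp
  | cons t l ih =>
    simp only [List.foldl_cons, pvStepA_eq, List.mem_cons]
    by_cases h : t = s
    · subst h
      simp [ih, pvU_idem]
    · have hst : ¬ s = t := fun e => h e.symm
      simp [h, ih, hst]

lemma rowA_eq (s : String) (row : List String) (tr : Option String × Option String × Option String) :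
    row.foldl (pvStepA s row) tr = pvW s row tr := by
  rw [foldl_stepA]
  by_cases h : s ∈ row
  · simp [h, pvU, pvW, pvF]
  · simp [h, pvW, pvF]

-- componentwise reading of A's fold
lemma fwd_comp (s : String) (l : List (List String))
    (tr : Option String × Option String × Option String) :
    l.foldl (fun tr row => pvW s row tr) tr =
      (l.foldl (fun o row => (pvF s 1 row).or o) tr.1,
       l.foldl (fun o row => (pvF s 2 row).or o) tr.2.1,
       l.foldl (fun o row => (pvF s 4 row).or o) tr.2.2) := by
  induction l generalizing tr with
  | nil => simp
  | cons r l ih =>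
    rw [List.foldl_cons, ih]
    simp [pvW]

-- B's loop never changes a fully-filled state (so the early break is sound)
lemma pvW'_full (s : String) (row : List String) (tr : Option String × Option String × Option String)
    (h : tr.1.isSome ∧ tr.2.1.isSome ∧ tr.2.2.isSome) : pvW' s row tr = tr := by
  rcases h with ⟨h1, h2, h3⟩
  rcases Option.isSome_iff_exists.mp h1 with ⟨a, ha⟩
  rcases Option.isSome_iff_exists.mp h2 with ⟨b, hb⟩
  rcases Option.isSome_iff_exists.mp h3 with ⟨c, hc⟩
  obtain ⟨x, y, z⟩ := tr
  simp_all [pvW']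

lemma foldl_W'_full (s : String) (l : List (List String))
    (tr : Option String × Option String × Option String)
    (h : tr.1.isSome ∧ tr.2.1.isSome ∧ tr.2.2.isSome) :
    l.foldl (fun tr row => pvW' s row tr) tr = tr := by
  induction l with
  | nil => rfl
  | cons r l ih => simp [pvW'_full s r tr h, ih]

lemma pvSetOnce (o : Option String) (x : String) :
    (if o = none ∧ x ≠ "" then some x else o) = o.or (if x ≠ "" then some x else none) := by
  cases o <;> split_ifs <;> simp_all

lemma loopB_eq (s : String) (l : List (List String))
    (tr : Option String × Option String × Option String) :
    pvLoopB s l tr = l.foldl (fun tr row => pvW' s row tr) tr := by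
  induction l generalizing tr with
  | nil => rfl
  | cons row rest ih =>
    rw [List.foldl_cons]
    by_cases h : s ∈ row
    · have e1 : (if tr.1 = none ∧ pvCell row 1 ≠ "" then some (pvCell row 1) else tr.1) =
          (pvW' s row tr).1 := by rw [pvSetOnce]; simp [pvW', pvF, h]
      have e2 : (if tr.2.1 = none ∧ pvCell row 2 ≠ "" then some (pvCell row 2) else tr.2.1) =
          (pvW' s row tr).2.1 := by rw [pvSetOnce]; simp [pvW', pvF, h]
      have e3 : (if tr.2.2 = none ∧ pvCell row 4 ≠ "" then some (pvCell row 4) else tr.2.2) =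
          (pvW' s row tr).2.2 := by rw [pvSetOnce]; simp [pvW', pvF, h]
      simp only [pvLoopB, h, if_true, e1, e2, e3]
      split_ifs with hfull
      · rw [foldl_W'_full s rest _ hfull]
      · exact ih _
    · have e0 : pvW' s row tr = tr := by simp [pvW', pvF, h]
      simp only [pvLoopB, h, if_false, e0]
      exact ih tr

-- componentwise reading of B's fold
lemma bwd_comp (s : String) (l : List (List String))
    (tr : Option String × Option String × Option String) :
    l.foldl (fun tr row => pvW' s row tr) tr =
      (l.foldl (fun o row => o.or (pvF s 1 row)) tr.1,
       l.foldl (fun o row => o.or (pvF s 2 row)) tr.2.1,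
       l.foldl (fun o row => o.or (pvF s 4 row)) tr.2.2) := by
  induction l generalizing tr with
  | nil => simp
  | cons r l ih =>
    rw [List.foldl_cons, ih]
    simp [pvW']

-- the generic 'last forward = first backward' lemma on Options
lemma or_foldl_init {α β : Type} (f : α → Option β) (l : List α) (init : Option β) :
    l.foldl (fun o r => (f r).or o) init = (l.foldl (fun o r => (f r).or o) none).or init := by
  induction l generalizing init with
  | nil => simp
  | cons r l ih =>
    simp only [List.foldl_cons, Option.or_none]
    rw [ih ((f r).or init), ih (f r), Option.or_assoc]

lemma revfill {α β : Type} (f : α → Option β) (l : List α) :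
    l.foldl (fun o r => (f r).or o) none = l.reverse.foldl (fun o r => o.or (f r)) none := by
  induction l with
  | nil => rfl
  | cons r l ih =>
    simp only [List.foldl_cons, List.reverse_cons, List.foldl_append, List.foldl_cons,
      List.foldl_nil, Option.or_none, ← ih]
    rw [or_foldl_init f l (f r)]

-- ===== VERDICT (by name: the statement is the Claim_ definition above) =====
theorem csvGetDates_spec : Claim_equal_csvGetDates := by
  intro csvData toSearch _hDom _hPre
  unfold Spec_csvGetDates csvGetDates csvGetDates_alt
  have hrows : (fun (tr : Option String × Option String × Option String) row =>
      row.foldl (pvStepA toSearch row) tr) = fun tr row => pvW toSearch row tr := by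
    funext tr row
    exact rowA_eq toSearch row tr
  rw [hrows, loopB_eq, fwd_comp, bwd_comp,
    revfill (fun row => pvF toSearch 1 row) csvData,
    revfill (fun row => pvF toSearch 2 row) csvData,
    revfill (fun row => pvF toSearch 4 row) csvData]
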